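-- pv_equiv track=rewrite | github.com/arek-grows/Challenges | Challenge287.py | ones_infection
-- ===== SOURCE A (Python) =====
-- def ones_infection(string: list[list[int]]) -> list[list[int]]:
--     end_matrix = [[0] * len(string[0])] * len(string)
--     # rows
--     for x, s in enumerate(string):
--         if 1 in s:
--             end_matrix[x] = [1] * len(s)
--     # columns
--     for r in range(len(string[0])):  # column indexes
--         for c in range(len(string)):  # row indexes
--
--             if string[c][r] == 1:  # if 1 in the column, reloop through the column to change every item to 1
--                 for x in range(len(string)):
--                     end_matrix[x][r] = 1
--                 break
--     return end_matrix  # Put your code here!!!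
-- ===== SOURCE B (Python) =====
-- def infect_rows(m):
--     return [[1] * len(r) if 1 in r else [0] * len(r) for r in m]
--
-- def ones_infection(string: list[list[int]]) -> list[list[int]]:
--     w = len(string[0])
--     transposed = [[row[r] for row in string] for r in range(w)]
--     row_marked = infect_rows(string)
--     col_marked_t = infect_rows(transposed)
--     col_marked = [[col[i] for col in col_marked_t] for i in range(len(string))]
--     return [[x or y for x, y in zip(a, b)] for a, b in zip(row_marked, col_marked)]
-- ===== Notes on version B (the rewrite author's own statement) =====
-- stated objective: alternative
-- what changed: A mutates an aliased matrix in place with a row pass and a per-column scan-with-break plus an inner write loop; B has no column logic at all: it reduces columns to rows by transposing, applies one row-infection helper to the matrix and to its transpose, and merges the two marked matrices elementwise with 'or'. …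
-- outside the precondition, e.g. on ones_infection([[1, 1], [0]]): A returns [[1, 1], [1, 1]], B raises IndexError; on ones_infection([[0], [1, 1]]): A returns [[1], [1, 1]], B returns [[1], [1]]
import Mathlib
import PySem

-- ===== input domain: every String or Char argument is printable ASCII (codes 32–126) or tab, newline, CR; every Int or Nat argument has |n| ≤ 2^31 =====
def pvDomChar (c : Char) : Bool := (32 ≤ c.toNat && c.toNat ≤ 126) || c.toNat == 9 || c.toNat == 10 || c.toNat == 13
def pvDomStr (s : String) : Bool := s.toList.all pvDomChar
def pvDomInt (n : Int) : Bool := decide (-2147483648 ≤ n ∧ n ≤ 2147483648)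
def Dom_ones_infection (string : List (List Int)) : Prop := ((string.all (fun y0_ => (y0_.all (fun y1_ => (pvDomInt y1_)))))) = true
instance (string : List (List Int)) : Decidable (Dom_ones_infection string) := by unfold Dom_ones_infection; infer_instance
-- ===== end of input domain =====

-- B removes A's in-place column machinery: one row-infection helper applied to the matrix and to its transpose, merged elementwise (alternative decomposition, same cost).
-- ===== PORT A =====
-- A's `end_matrix = [[0]*w]*n` makes every row an ALIAS of one shared list; the port models that
-- heap exactly: `sh` is the shared zero row, and the rows list holds `none` for "still the shared
-- list" and `some own` for a row rebound by `end_matrix[x] = [1]*len(s)`.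

-- for x, s in enumerate(string): if 1 in s: end_matrix[x] = [1]*len(s)
def pvRowLoop (x : Nat) (l : List (List Int)) (rows : List (Option (List Int))) :
    List (Option (List Int)) :=
  match l with
  | [] => rows
  | s :: rest =>
      pvRowLoop (x + 1) rest
        (if 1 ∈ s then rows.set x (some (List.replicate s.length 1)) else rows)

-- end_matrix[x][r] = 1  (writing through the alias mutates the shared list; an out-of-range
-- write raises in Python and is a no-op here — Pre_ excludes those inputs)
def pvSetAt (r : Nat) (st : List Int × List (Option (List Int))) (x : Nat) :
    List Int × List (Option (List Int)) :=
  match st.2[x]? with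
  | some (some own) => (st.1, st.2.set x (some (own.set r 1)))
  | _ => (st.1.set r 1, st.2)

-- for c in range(len(string)): if string[c][r] == 1: for x in range(len(string)): …; break
-- (an out-of-range read of string[c][r] raises in Python and yields the default 0 here;
-- Pre_ excludes those inputs)
def pvColScan (string : List (List Int)) (r : Nat) (cs : List Nat)
    (st : List Int × List (Option (List Int))) : List Int × List (Option (List Int)) :=
  match cs with
  | [] => st
  | c :: cs' =>
      if ((string[c]?.getD [])[r]?).getD 0 = 1 then
        (List.range string.length).foldl (pvSetAt r) st
      else pvColScan string r cs' st

-- for r in range(len(string[0])): …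
def pvColLoop (string : List (List Int)) (rs : List Nat)
    (st : List Int × List (Option (List Int))) : List Int × List (Option (List Int)) :=
  match rs with
  | [] => st
  | r :: rs' => pvColLoop string rs' (pvColScan string r (List.range string.length) st)

def ones_infection (string : List (List Int)) : List (List Int) :=
  let w := (string.headD []).length   -- len(string[0]); Pre_ guarantees string ≠ []
  let rows0 := pvRowLoop 0 string (List.replicate string.length none)
  let st := pvColLoop string (List.range w) (List.replicate w 0, rows0)
  st.2.map (fun o => o.getD st.1)

-- ===== PORT B =====
-- [[1]*len(r) if 1 in r else [0]*len(r) for r in m]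
def infectRows (m : List (List Int)) : List (List Int) :=
  m.map (fun r => if 1 ∈ r then List.replicate r.length 1 else List.replicate r.length 0)

def ones_infection_alt (string : List (List Int)) : List (List Int) :=
  let w := (string.headD []).length   -- len(string[0]); Pre_ guarantees string ≠ []
  -- row[r]: Pre_ guarantees r < w ≤ len(row), so the .getD 0 default is never taken
  let transposed := (List.range w).map (fun r => string.map (fun row => (row[r]?).getD 0))
  let rowMarked := infectRows string
  let colMarkedT := infectRows transposed
  -- col[i]: every column of `transposed` has length len(string), so i is in range
  let colMarked := (List.range string.length).map
      (fun i => colMarkedT.map (fun col => (col[i]?).getD 0))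
  -- x or y: both marks are 0/1 ints, Python's `x or y` is x if x ≠ 0 else y
  (rowMarked.zip colMarked).map (fun p => (p.1.zip p.2).map (fun q => if q.1 ≠ 0 then q.1 else q.2))

-- ===== PRECONDITION & SPEC =====
-- Pre_ excludes the empty matrix, on which A raises IndexError, and ragged matrices (a row
-- shorter than len(string[0]), or a row containing 1 longer than it), on which A's per-row
-- output lengths are an accident of its shared-alias initialisation and B's transpose-based
-- result has uniform width (on part of those ragged inputs A raises IndexError too).
def Pre_ones_infection (string : List (List Int)) : Prop :=
  string ≠ [] ∧ ∀ row ∈ string,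
    (string.headD []).length ≤ row.length ∧ (1 ∈ row → row.length = (string.headD []).length)
instance (string : List (List Int)) : Decidable (Pre_ones_infection string) := by
  unfold Pre_ones_infection; infer_instance

def pvWitness_ones_infection : List (List Int) := [[1, 0], [0, 0]]

def Spec_ones_infection (string : List (List Int)) (out : List (List Int)) : Prop :=
  out = ones_infection_alt string
instance (string : List (List Int)) (out : List (List Int)) : Decidable (Spec_ones_infection string out) := by
  unfold Spec_ones_infection; infer_instance

-- ===== CLAIM (what is proved, stated in full; the proofs are below) =====
def Claim_equal_ones_infection : Prop := ∀ (string : List (List Int)), Dom_ones_infection string → Pre_ones_infection string → Spec_ones_infection string (ones_infection string)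

-- ===== LEMMAS AND PROOFS =====

-- is end_matrix[x] a rebound own row (vs the shared alias)?
def pvIsOwn (rows : List (Option (List Int))) (x : Nat) : Bool := (rows[x]?.getD none).isSome

theorem pvRowLoop_spec (l : List (List Int)) (pre : List (Option (List Int))) :
    pvRowLoop pre.length l (pre ++ List.replicate l.length none)
      = pre ++ l.map (fun s => if 1 ∈ s then some (List.replicate s.length 1) else none) := by
  induction l generalizing pre with
  | nil => simp [pvRowLoop]
  | cons s rest ih =>
    have hrep : List.replicate (s :: rest).length (none : Option (List Int))
        = none :: List.replicate rest.length none := by simp [List.replicate_succ]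
    by_cases hs : 1 ∈ s
    · have step : pvRowLoop pre.length (s :: rest) (pre ++ List.replicate (s :: rest).length none)
          = pvRowLoop (pre.length + 1) rest
              ((pre ++ [some (List.replicate s.length 1)]) ++ List.replicate rest.length none) := by
        rw [hrep]
        simp [pvRowLoop, hs]
      have ih' := ih (pre ++ [some (List.replicate s.length 1)])
      simp only [List.length_append, List.length_cons, List.length_nil] at ih'
      rw [step]
      simpa [hs] using ih'
    · have step : pvRowLoop pre.length (s :: rest) (pre ++ List.replicate (s :: rest).length none)
          = pvRowLoop (pre.length + 1) rest
              ((pre ++ [(none : Option (List Int))]) ++ List.replicate rest.length none) := by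
        rw [hrep]
        simp [pvRowLoop, hs]
      have ih' := ih (pre ++ [(none : Option (List Int))])
      simp only [List.length_append, List.length_cons, List.length_nil] at ih'
      rw [step]
      simpa [hs] using ih'

theorem pv_set_self {α : Type} (l : List α) (i : Nat) (a : α) (h : l[i]? = some a) :
    l.set i a = l := by
  apply List.ext_getElem?
  intro j
  rw [List.getElem?_set]
  split
  · next hij =>
    subst hij
    have hlt : i < l.length := by
      by_contra hc
      rw [List.getElem?_eq_none (by omega)] at h
      cases h
    rw [List.getElem?_eq_getElem hlt] at h
    simp only [hlt, if_true, List.getElem?_eq_getElem hlt, Option.some.injEq]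
    exact (Option.some.inj h).symm
  · rfl

theorem pv_set_replicate (w r : Nat) :
    (List.replicate w (1 : Int)).set r 1 = List.replicate w 1 := by
  apply List.ext_getElem?
  intro j
  rw [List.getElem?_set]
  split
  · next hij =>
    subst hij
    rw [List.getElem?_replicate]
    simp
  · rfl

theorem pv_inner_spec (r : Nat) (xs : List Nat) (sh : List Int)
    (rows : List (Option (List Int)))
    (hrows : ∀ (x : Nat) (l : List Int), rows[x]? = some (some l) → l.set r 1 = l) :
    xs.foldl (pvSetAt r) (sh, rows)
      = ((if xs.any (fun x => !pvIsOwn rows x) then sh.set r 1 else sh), rows) := by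
  induction xs generalizing sh with
  | nil => simp
  | cons x xs ih =>
    rw [List.foldl_cons]
    cases hx : rows[x]? with
    | none =>
      have hstep : pvSetAt r (sh, rows) x = (sh.set r 1, rows) := by
        simp [pvSetAt, hx]
      rw [hstep, ih]
      simp [pvIsOwn, hx, List.set_set]
    | some o =>
      cases o with
      | none =>
        have hstep : pvSetAt r (sh, rows) x = (sh.set r 1, rows) := by
          simp [pvSetAt, hx]
        rw [hstep, ih]
        simp [pvIsOwn, hx, List.set_set]
      | some l =>
        have hstep : pvSetAt r (sh, rows) x = (sh, rows) := by
          simp only [pvSetAt, hx]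
          rw [hrows x l hx, pv_set_self rows x (some l) hx]
        rw [hstep, ih]
        simp [pvIsOwn, hx]

theorem pv_colScan_spec (string : List (List Int)) (r : Nat) (cs : List Nat)
    (sh : List Int) (rows : List (Option (List Int)))
    (hrows : ∀ (x : Nat) (l : List Int), rows[x]? = some (some l) → l.set r 1 = l) :
    pvColScan string r cs (sh, rows)
      = ((if cs.any (fun c => ((string[c]?.getD [])[r]?).getD 0 == 1)
             && (List.range string.length).any (fun x => !pvIsOwn rows x)
          then sh.set r 1 else sh), rows) := by
  induction cs with
  | nil => simp [pvColScan]
  | cons c cs ih =>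
    by_cases hc : ((string[c]?.getD [])[r]?).getD 0 = 1
    · rw [show pvColScan string r (c :: cs) (sh, rows)
          = (List.range string.length).foldl (pvSetAt r) (sh, rows) by simp [pvColScan, hc]]
      rw [pv_inner_spec r _ sh rows hrows]
      simp [hc]
    · rw [show pvColScan string r (c :: cs) (sh, rows)
          = pvColScan string r cs (sh, rows) by simp [pvColScan, hc]]
      rw [ih]
      simp [hc]

theorem pv_colLoop_spec (string : List (List Int)) (rs : List Nat)
    (sh : List Int) (rows : List (Option (List Int)))
    (hrows : ∀ (x : Nat) (l : List Int), rows[x]? = some (some l) → ∀ r : Nat, l.set r 1 = l) :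
    pvColLoop string rs (sh, rows)
      = (rs.foldl (fun sh r =>
            if (List.range string.length).any (fun c => ((string[c]?.getD [])[r]?).getD 0 == 1)
               && (List.range string.length).any (fun x => !pvIsOwn rows x)
            then sh.set r 1 else sh) sh, rows) := by
  induction rs generalizing sh with
  | nil => simp [pvColLoop]
  | cons r rs ih =>
    rw [show pvColLoop string (r :: rs) (sh, rows)
        = pvColLoop string rs (pvColScan string r (List.range string.length) (sh, rows)) from rfl]
    rw [pv_colScan_spec string r _ sh rows (fun x l hx => hrows x l hx r)]
    rw [ih]
    simp

theorem pv_foldl_sets_getElem? (P : Nat → Bool) (rs : List Nat) (sh : List Int) (j : Nat) :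
    (rs.foldl (fun sh r => if P r then sh.set r 1 else sh) sh)[j]?
      = if P j && decide (j ∈ rs) then (if j < sh.length then some 1 else none) else sh[j]? := by
  induction rs generalizing sh with
  | nil => simp
  | cons r rs ih =>
    rw [List.foldl_cons, ih]
    by_cases hPr : P r
    · simp only [hPr, if_true, List.length_set]
      by_cases hjr : j = r
      · subst hjr
        simp [hPr, List.getElem?_set]
      · rw [List.getElem?_set]
        simp [Ne.symm hjr, hjr]
    · simp only [hPr]
      by_cases hjr : j = r
      · subst hjr
        simp [hPr]
      · simp [hjr]

theorem pv_any_range_getD {α : Type} (l : List α) (d : α) (p : α → Bool) :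
    (List.range l.length).any (fun c => p (l[c]?.getD d)) = l.any p := by
  rw [Bool.eq_iff_iff]
  simp only [List.any_eq_true, List.mem_range]
  constructor
  · rintro ⟨c, hc, hp⟩
    refine ⟨l[c], List.getElem_mem hc, ?_⟩
    rwa [List.getElem?_eq_getElem hc] at hp
  · rintro ⟨a, ha, hp⟩
    obtain ⟨c, hc, rfl⟩ := List.mem_iff_getElem.mp ha
    exact ⟨c, hc, by rwa [List.getElem?_eq_getElem hc]⟩

theorem pv_shared_eq (string : List (List Int)) :
    (List.range string.length).any
        (fun x => !pvIsOwn (string.map (fun s : List Int => if 1 ∈ s then some (List.replicate s.length 1) else none)) x)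
      = string.any (fun s => !(decide (1 ∈ s))) := by
  rw [Bool.eq_iff_iff]
  simp only [List.any_eq_true, List.mem_range]
  constructor
  · rintro ⟨x, hx, hp⟩
    refine ⟨string[x], List.getElem_mem hx, ?_⟩
    simp only [pvIsOwn, List.getElem?_map, List.getElem?_eq_getElem hx, Option.map_some,
      Option.getD_some] at hp
    by_cases h1 : 1 ∈ string[x]
    · simp [h1] at hp
    · simp [h1]
  · rintro ⟨s, hs, hp⟩
    obtain ⟨x, hx, rfl⟩ := List.mem_iff_getElem.mp hs
    refine ⟨x, hx, ?_⟩
    simp only [Bool.not_eq_eq_eq_not, Bool.not_true, decide_eq_false_iff_not] at hp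
    simp [pvIsOwn, List.getElem?_map, List.getElem?_eq_getElem hx, hp]

theorem pv_assemble (string : List (List Int)) (w : Nat) (S : Bool)
    (hS : S = string.any (fun s => !(decide (1 ∈ s)))) :
    List.map (fun o => o.getD (List.foldl
        (fun sh r => if ((List.range string.length).any (fun c => ((string[c]?.getD [])[r]?).getD 0 == 1) && S) = true
          then sh.set r 1 else sh)
        (List.replicate w 0) (List.range w)))
      (string.map (fun s => if 1 ∈ s then some (List.replicate s.length 1) else none))
    = string.map (fun row => if 1 ∈ row then List.replicate row.length 1
        else (List.range w).map
          (fun r => if string.any (fun row => ((row[r]?.getD 0) == 1)) then (1 : Int) else 0)) := by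
  rw [List.map_map]
  apply List.map_congr_left
  intro s hs
  simp only [Function.comp]
  by_cases h1 : 1 ∈ s
  · simp [h1]
  · have hStrue : S = true := by
      rw [hS]
      simp only [List.any_eq_true]
      exact ⟨s, hs, by simpa using h1⟩
    simp only [h1, if_false, Option.getD_none, hStrue, Bool.and_true]
    apply List.ext_getElem?
    intro j
    rw [pv_foldl_sets_getElem?]
    simp only [List.getElem?_map]
    by_cases hj : j < w
    · rw [List.getElem?_range hj]
      rw [pv_any_range_getD string ([] : List Int) (fun row => ((row[j]?.getD 0) == 1))]
      simp only [List.getElem?_replicate, hj, if_true, List.length_replicate, List.mem_range,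
        decide_true, Bool.and_true, Option.map_some]
      by_cases hany : string.any (fun row => ((row[j]?.getD 0) == 1)) = true
      · simp [hany]
      · simp [Bool.eq_false_iff.mpr hany]
    · have h1' : (List.range w)[j]? = none := List.getElem?_eq_none (by simpa using hj)
      rw [h1']
      simp [hj, List.mem_range]

-- A's port equals the canonical per-row form (unconditionally)
theorem pv_A_canon (string : List (List Int)) :
    ones_infection string = string.map (fun row => if 1 ∈ row then List.replicate row.length 1
      else (List.range (string.headD []).length).map
        (fun r => if string.any (fun row => ((row[r]?.getD 0) == 1)) then (1 : Int) else 0)) := by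
  unfold ones_infection
  simp only []
  have hrow0 : pvRowLoop 0 string (List.replicate string.length none)
      = string.map (fun s => if 1 ∈ s then some (List.replicate s.length 1) else none) := by
    simpa using pvRowLoop_spec string ([] : List (Option (List Int)))
  rw [hrow0]
  have hrows : ∀ (x : Nat) (l : List Int),
      (string.map (fun s => if 1 ∈ s then some (List.replicate s.length 1) else none))[x]? = some (some l) →
      ∀ r : Nat, l.set r 1 = l := by
    intro x l hx r
    rw [List.getElem?_map] at hx
    cases hsx : string[x]? with
    | none => rw [hsx] at hx; cases hx
    | some s =>
      rw [hsx] at hx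
      simp only [Option.map_some] at hx
      split at hx
      · rw [← Option.some.inj (Option.some.inj hx)]
        exact pv_set_replicate _ r
      · cases Option.some.inj hx
  rw [pv_colLoop_spec string _ _ _ hrows]
  exact pv_assemble string ((string.headD []).length) _ (pv_shared_eq string)

-- x or y over a row of ones: the left operand always wins
theorem pv_zipmap_ones (l : List Int) :
    ((List.replicate l.length (1 : Int)).zip l).map (fun q => if q.1 ≠ 0 then q.1 else q.2)
      = List.replicate l.length 1 := by
  apply List.ext_getElem
  · simp
  · intro j hj hj'
    simp only [List.getElem_map, List.getElem_zip, List.getElem_replicate]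
    norm_num

-- x or y over a row of zeros: the right operand survives (zip truncates to the shorter list)
theorem pv_zipmap_zeros (l : List Int) (L : Nat) (h : l.length ≤ L) :
    ((List.replicate L (0 : Int)).zip l).map (fun q => if q.1 ≠ 0 then q.1 else q.2) = l := by
  apply List.ext_getElem
  · simp [Nat.min_eq_right h]
  · intro j hj hj'
    simp only [List.getElem_map, List.getElem_zip, List.getElem_replicate]
    norm_num

-- B's port equals the same canonical form on Pre_
theorem pv_B_canon (string : List (List Int))
    (h2 : ∀ row ∈ string,
      (string.headD []).length ≤ row.length ∧ (1 ∈ row → row.length = (string.headD []).length)) :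
    ones_infection_alt string = string.map (fun row => if 1 ∈ row then List.replicate row.length 1
      else (List.range (string.headD []).length).map
        (fun r => if string.any (fun row => ((row[r]?.getD 0) == 1)) then (1 : Int) else 0)) := by
  unfold ones_infection_alt infectRows
  simp only [List.map_map]
  apply List.ext_getElem
  · simp
  intro i hi hi'
  simp only [List.length_map, List.length_zip, List.length_range, min_self] at hi
  simp only [List.getElem_map, List.getElem_zip, List.getElem_range]
  have hCol :
      (List.range (string.headD []).length).map
          ((fun col : List Int => col[i]?.getD 0) ∘
            (fun r : List Int => if 1 ∈ r then List.replicate r.length 1 else List.replicate r.length 0) ∘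
            (fun r : Nat => string.map (fun row => (row[r]?).getD 0)))
        = (List.range (string.headD []).length).map
            (fun r => if string.any (fun row => ((row[r]?.getD 0) == 1)) then (1 : Int) else 0) := by
    apply List.map_congr_left
    intro r _
    simp only [Function.comp_apply, List.length_map]
    have hmem : (1 ∈ string.map (fun row => (row[r]?).getD 0))
        ↔ string.any (fun row => ((row[r]?.getD 0) == 1)) = true := by
      simp only [List.mem_map, List.any_eq_true, beq_iff_eq]
    by_cases hx : string.any (fun row => ((row[r]?.getD 0) == 1)) = true
    · rw [if_pos (hmem.mpr hx), if_pos hx]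
      simp [hi]
    · rw [if_neg (fun hm => hx (hmem.mp hm)), if_neg hx]
      simp [hi]
  have hClen : ((List.range (string.headD []).length).map
      (fun r => if string.any (fun row => ((row[r]?.getD 0) == 1)) then (1 : Int) else 0)).length
      = (string.headD []).length := by simp
  obtain ⟨hge, hone⟩ := h2 string[i] (List.getElem_mem hi)
  by_cases h1 : 1 ∈ string[i]
  · simp only [h1, if_true, hone h1]
    rw [hCol]
    have hz := pv_zipmap_ones ((List.range (string.headD []).length).map
      (fun r => if string.any (fun row => ((row[r]?.getD 0) == 1)) then (1 : Int) else 0))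
    rw [hClen] at hz
    exact hz
  · simp only [h1, if_false]
    rw [hCol]
    exact pv_zipmap_zeros _ _ (by rw [hClen]; exact hge)

-- ===== VERDICT (by name: the statement is the Claim_ definition above) =====
theorem ones_infection_spec : Claim_equal_ones_infection := by
  intro string _hdom hpre
  unfold Spec_ones_infection
  rw [pv_A_canon, pv_B_canon string hpre.2]
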